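-- pv_equiv track=rewrite | github.com/Aasthaengg/IBMdataset | Python_codes/p03088/s489672072.py | hash_index
-- ===== SOURCE A (Python) =====
-- def hash_index(s):
--   num=0
--   length=len(s)
--   for i in range(length):
--     letter=s[length-1-i]
--     if letter=='A': k=0
--     elif letter=='G': k=1
--     elif letter=='C': k=2
--     else: k=3
--     num=num+k*4**i
--   return num
-- ===== SOURCE B (Python) =====
-- def hash_index(s):
--   num = 0
--   for letter in s:
--     if letter == 'A': k = 0
--     elif letter == 'G': k = 1
--     elif letter == 'C': k = 2
--     else: k = 3
--     num = num * 4 + k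
--   return num
-- ===== Notes on version B (the rewrite author's own statement) =====
-- stated objective: faster
-- what changed: Replaces the reverse-indexed loop with explicit powers 4**i by a forward Horner pass (num = num*4 + k over the characters), dropping the length/reverse-index bookkeeping and the 4**i exponentiation.
import Mathlib
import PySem

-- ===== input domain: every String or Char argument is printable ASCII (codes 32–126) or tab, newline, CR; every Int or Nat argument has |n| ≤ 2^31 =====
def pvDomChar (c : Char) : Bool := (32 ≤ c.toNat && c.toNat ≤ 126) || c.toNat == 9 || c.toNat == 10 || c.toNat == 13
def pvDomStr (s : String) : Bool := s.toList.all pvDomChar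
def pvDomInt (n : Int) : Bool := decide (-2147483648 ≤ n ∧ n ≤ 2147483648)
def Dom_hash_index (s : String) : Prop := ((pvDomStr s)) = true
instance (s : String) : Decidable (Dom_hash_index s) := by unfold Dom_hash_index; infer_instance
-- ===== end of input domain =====

-- B replaces A's reverse-indexed loop with explicit powers 4**i by a forward Horner pass (simpler).

-- the shared if/elif/else letter mapping (A->0, G->1, C->2, else 3), used by both ports
def pvK (c : Char) : Int :=
  if c = 'A' then 0 else if c = 'G' then 1 else if c = 'C' then 2 else 3

-- ===== PORT A =====
-- s[length-1-i] is always in range (0 ≤ i < length), so pyGetD's default is never used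
def hash_index (s : String) : Int :=
  let xs := s.toList
  let length : Int := xs.length
  (PySem.List.pyRange 0 length 1).foldl
    (fun num i => num + pvK (PySem.List.pyGetD xs (length - 1 - i) ' ') * 4 ^ i.toNat) 0

-- ===== PORT B =====
def hash_index_alt (s : String) : Int :=
  s.toList.foldl (fun num c => num * 4 + pvK c) 0

-- ===== PRECONDITION & SPEC =====
def Spec_hash_index (s : String) (out : Int) : Prop := out = hash_index_alt s
instance (s : String) (out : Int) : Decidable (Spec_hash_index s out) := by unfold Spec_hash_index; infer_instance

-- ===== CLAIM (what is proved, stated in full; the proofs are below) =====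
def Claim_equal_hash_index : Prop := ∀ (s : String), Dom_hash_index s → Spec_hash_index s (hash_index s)

-- ===== LEMMAS AND PROOFS =====

def pvFoldA (l : List Char) : Int :=
  (PySem.List.pyRange 0 (l.length : Int) 1).foldl
    (fun num i => num + pvK (PySem.List.pyGetD l ((l.length : Int) - 1 - i) ' ') * 4 ^ i.toNat) 0

theorem pvFoldB_shift (l : List Char) :
    ∀ a : Int, l.foldl (fun num c => num * 4 + pvK c) a
      = a * 4 ^ l.length + l.foldl (fun num c => num * 4 + pvK c) 0 := by
  induction l with
  | nil => intro a; simp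
  | cons c t ih =>
      intro a
      simp only [List.foldl_cons, List.length_cons]
      rw [ih (a * 4 + pvK c), ih (0 * 4 + pvK c)]
      ring

theorem pvFoldA_cons (c : Char) (t : List Char) :
    pvFoldA (c :: t) = pvFoldA t + pvK c * 4 ^ t.length := by
  unfold pvFoldA
  have hlen : ((c :: t).length : Int) = (t.length : Int) + 1 := by
    simp
  rw [hlen, PySem.List.pyRange_one_succ_right (by positivity), List.foldl_append]
  simp only [List.foldl_cons, List.foldl_nil]
  have hmid :
      (PySem.List.pyRange 0 (t.length : Int) 1).foldl
        (fun num i => num + pvK (PySem.List.pyGetD (c :: t) ((t.length : Int) + 1 - 1 - i) ' ') * 4 ^ i.toNat) 0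
      = (PySem.List.pyRange 0 (t.length : Int) 1).foldl
        (fun num i => num + pvK (PySem.List.pyGetD t ((t.length : Int) - 1 - i) ' ') * 4 ^ i.toNat) 0 := by
    apply PySem.List.foldl_congr_mem
    intro acc i hi
    rw [PySem.List.mem_pyRange_one] at hi
    have h1 : PySem.List.pyGetD (c :: t) ((t.length : Int) + 1 - 1 - i) ' '
        = PySem.List.pyGetD t ((t.length : Int) - 1 - i) ' ' := by
      rw [PySem.List.pyGetD_eq_getElem (c :: t) ' ' (by omega) (by simp; omega),
          PySem.List.pyGetD_eq_getElem t ' ' (by omega) (by omega)]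
      have hnat : ((t.length : Int) + 1 - 1 - i).toNat = ((t.length : Int) - 1 - i).toNat + 1 := by
        omega
      rw [List.getElem_cons]
      split_ifs with h0
      · exact absurd h0 (by omega)
      · congr 1
        omega
    rw [h1]
  rw [hmid]
  have hget : PySem.List.pyGetD (c :: t) ((t.length : Int) + 1 - 1 - (t.length : Int)) ' ' = c := by
    have : (t.length : Int) + 1 - 1 - (t.length : Int) = 0 := by ring
    rw [this, PySem.List.pyGetD_zero_cons]
  rw [hget]
  simp

theorem pvFoldA_eq_foldB (l : List Char) :
    pvFoldA l = l.foldl (fun num c => num * 4 + pvK c) 0 := by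
  induction l with
  | nil => simp [pvFoldA]
  | cons c t ih =>
      rw [pvFoldA_cons, ih, List.foldl_cons, pvFoldB_shift t (0 * 4 + pvK c)]
      ring

-- ===== VERDICT (by name: the statement is the Claim_ definition above) =====
theorem hash_index_spec : Claim_equal_hash_index := by
  intro s _
  unfold Spec_hash_index hash_index hash_index_alt
  exact pvFoldA_eq_foldB s.toList
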